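-- pv_equiv track=rewrite | github.com/PavelMystic/AdventOfCode2024 | src/challenges/day_2.py | get_reports_safety_w_dampener_brute
-- ===== SOURCE A (Python) =====
-- def is_report_safe(report: list[int]) -> bool:
--     """The function evaluated the safety of report. Report is safe, if it is
--     monotonic and the difference bwtween subsequent numbers is one or more and
--     three and less.
--
--     Args:
--         report (list[int]): report, sequence of integers
--
--     Returns:
--         bool: true means the report is safe
--     """
--
--     report_diff = [
--         next_element - element for element, next_element in zip(report[:-1], report[1:])
--     ]
--     is_monotonic = all((element < 0 for element in report_diff)) or all(
--         (element > 0 for element in report_diff)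
--     )
--
--     if not is_monotonic:
--         return False
--
--     is_within_boundaries = all((1 <= abs(element) <= 3 for element in report_diff))
--
--     if is_within_boundaries:
--
--         return True
--
--     return False
--
-- def get_reports_safety_w_dampener_brute(reports: list[list[int]]) -> list[bool]:
--
--     safety_list: list[bool] = []
--
--     for report in reports:
--         is_safe_at_all = False
--         for idx in range(len(report)):
--             is_safe = is_report_safe(
--                 [
--                     element
--                     for element_idx, element in enumerate(report)
--                     if element_idx != idx
--                 ]
--             )
--
--             if is_safe:
--                 is_safe_at_all = True
--
--         safety_list.append(is_safe_at_all)
--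
--     return safety_list
-- ===== SOURCE B (Python) =====
-- def _ok(r, lo, hi):
--     """All adjacent differences lie in [lo, hi]."""
--     return all(lo <= y - x <= hi for x, y in zip(r, r[1:]))
--
--
-- def _damp_dir(r, lo, hi):
--     """Is some one-element removal of r all-diffs-in-[lo,hi]?  Single scan:
--     only removing an endpoint of the FIRST violating pair can possibly help."""
--     for i, (x, y) in enumerate(zip(r, r[1:])):
--         if not (lo <= y - x <= hi):
--             return _ok(r[:i] + r[i + 1:], lo, hi) or _ok(r[:i + 1] + r[i + 2:], lo, hi)
--     return True
--
--
-- def get_reports_safety_w_dampener_brute(reports):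
--     return [bool(r) and (_damp_dir(r, 1, 3) or _damp_dir(r, -3, -1)) for r in reports]
-- ===== Notes on version B (the rewrite author's own statement) =====
-- stated objective: faster
-- what changed: A re-checks every one-element removal of every report from scratch (diff list + three passes each); B does a single scan per direction and, on the first violating adjacent pair, tests only the two removals at that pair's endpoints.
import Mathlib
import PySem

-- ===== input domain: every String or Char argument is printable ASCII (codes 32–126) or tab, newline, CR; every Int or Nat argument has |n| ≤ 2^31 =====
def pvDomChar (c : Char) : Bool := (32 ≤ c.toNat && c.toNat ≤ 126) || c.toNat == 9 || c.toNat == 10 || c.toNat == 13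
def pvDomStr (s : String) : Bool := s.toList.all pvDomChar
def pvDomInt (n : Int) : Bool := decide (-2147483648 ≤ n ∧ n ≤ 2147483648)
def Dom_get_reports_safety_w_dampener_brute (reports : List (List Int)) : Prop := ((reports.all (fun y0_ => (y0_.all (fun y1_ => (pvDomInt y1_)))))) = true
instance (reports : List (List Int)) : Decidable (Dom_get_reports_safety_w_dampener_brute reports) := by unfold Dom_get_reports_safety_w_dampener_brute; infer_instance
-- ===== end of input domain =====

-- B replaces A's try-every-removal brute force (each removal rechecked from scratch) by a single
-- scan per direction: only the two endpoints of the FIRST violating adjacent pair can be removed.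

-- ===== PORT A =====
-- report[:-1] ported as dropLast, report[1:] as drop 1 (exact for these slice arguments)
def is_report_safe (report : List Int) : Bool :=
  let report_diff := (report.dropLast.zip (report.drop 1)).map (fun p => p.2 - p.1)
  let is_monotonic := report_diff.all (fun e => decide (e < 0)) || report_diff.all (fun e => decide (0 < e))
  if !is_monotonic then false
  else
    let is_within_boundaries := report_diff.all (fun e => decide (1 ≤ |e|) && decide (|e| ≤ 3))
    if is_within_boundaries then true else false

def get_reports_safety_w_dampener_brute (reports : List (List Int)) : List Bool :=
  reports.foldl (fun safety_list report =>
    let is_safe_at_all :=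
      (PySem.List.pyRange 0 (report.length : Int)).foldl (fun flag idx =>
        let filtered := ((PySem.List.enumerate report).filter (fun p => !decide (p.1 = idx))).map Prod.snd
        let is_safe := is_report_safe filtered
        if is_safe then true else flag) false
    safety_list ++ [is_safe_at_all]) []

-- ===== PORT B =====
-- zip(r, r[1:]) — the adjacent pairs of r
def pvPairs (r : List Int) : List (Int × Int) := r.zip (r.drop 1)

-- _ok: all adjacent differences lie in [lo, hi]
def pvOk (lo hi : Int) (r : List Int) : Bool :=
  (pvPairs r).all (fun p => decide (lo ≤ p.2 - p.1) && decide (p.2 - p.1 ≤ hi))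

-- _damp_dir: scan for the first violating pair; try only its two endpoint removals
-- (r[:i]+r[i+1:] and r[:i+1]+r[i+2:] ported as take/drop, exact for these slice arguments)
def pvDampDir (lo hi : Int) (r : List Int) : Bool :=
  match (pvPairs r).findIdx? (fun p => !(decide (lo ≤ p.2 - p.1) && decide (p.2 - p.1 ≤ hi))) with
  | none => true
  | some i => pvOk lo hi (r.take i ++ r.drop (i + 1)) || pvOk lo hi (r.take (i + 1) ++ r.drop (i + 2))

def get_reports_safety_w_dampener_brute_alt (reports : List (List Int)) : List Bool :=
  reports.map (fun r => !r.isEmpty && (pvDampDir 1 3 r || pvDampDir (-3) (-1) r))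

-- ===== PRECONDITION & SPEC =====
def Spec_get_reports_safety_w_dampener_brute (reports : List (List Int)) (out : List Bool) : Prop := out = get_reports_safety_w_dampener_brute_alt reports
instance (reports : List (List Int)) (out : List Bool) : Decidable (Spec_get_reports_safety_w_dampener_brute reports out) := by unfold Spec_get_reports_safety_w_dampener_brute; infer_instance

-- ===== CLAIM (what is proved, stated in full; the proofs are below) =====
def Claim_equal_get_reports_safety_w_dampener_brute : Prop := ∀ (reports : List (List Int)), Dom_get_reports_safety_w_dampener_brute reports → Spec_get_reports_safety_w_dampener_brute reports (get_reports_safety_w_dampener_brute reports)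

-- ===== LEMMAS AND PROOFS =====

theorem pvPairs_length (r : List Int) : (pvPairs r).length = r.length - 1 := by
  simp [pvPairs]

theorem pvPairs_getElem (r : List Int) (k : Nat) (h : k < (pvPairs r).length) :
    (pvPairs r)[k] = (r[k]'(by simp [pvPairs_length] at h; omega),
                      r[k+1]'(by simp [pvPairs_length] at h; omega)) := by
  simp [pvPairs, List.getElem_zip]

-- index characterisation of pvOk
theorem pvOk_iff (lo hi : Int) (r : List Int) :
    pvOk lo hi r = true ↔
      ∀ k (h : k + 1 < r.length), lo ≤ r[k+1] - r[k]'(by omega) ∧ r[k+1] - r[k]'(by omega) ≤ hi := by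
  unfold pvOk
  rw [List.all_eq_true]
  constructor
  · intro h k hk
    have hk' : k < (pvPairs r).length := by rw [pvPairs_length]; omega
    have := h _ (List.getElem_mem hk')
    rw [pvPairs_getElem] at this
    simpa using this
  · intro h p hp
    obtain ⟨k, hk, rfl⟩ := List.mem_iff_getElem.mp hp
    rw [pvPairs_getElem]
    have hk2 : k + 1 < r.length := by rw [pvPairs_length] at hk; omega
    simpa using h k hk2

-- the diff list A builds ranges over the same pairs as pvPairs
theorem dropLast_zip_drop (r : List Int) : r.dropLast.zip (r.drop 1) = pvPairs r := by
  induction r with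
  | nil => rfl
  | cons a t ih =>
    cases t with
    | nil => rfl
    | cons b t' => simpa [pvPairs] using ih

-- A's safety check = "ascending by 1..3" or "descending by 1..3"
theorem key_all (L : List (Int × Int)) :
    (((L.map (fun p => p.2 - p.1)).all (fun e => decide (e < 0)) ||
      (L.map (fun p => p.2 - p.1)).all (fun e => decide (0 < e))) &&
     (L.map (fun p => p.2 - p.1)).all (fun e => decide (1 ≤ |e|) && decide (|e| ≤ 3)))
    = (L.all (fun p => decide (1 ≤ p.2 - p.1) && decide (p.2 - p.1 ≤ 3)) ||
       L.all (fun p => decide (-3 ≤ p.2 - p.1) && decide (p.2 - p.1 ≤ -1))) := by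
  rw [Bool.eq_iff_iff]
  simp only [List.all_map, Bool.and_eq_true, Bool.or_eq_true, List.all_eq_true,
    Function.comp, decide_eq_true_eq, abs_le, le_abs']
  constructor
  · rintro ⟨hm | hm, hb⟩
    · right; intro p hp; have h1 := hm p hp; have h2 := hb p hp; omega
    · left; intro p hp; have h1 := hm p hp; have h2 := hb p hp; omega
  · rintro (h | h)
    · exact ⟨Or.inr fun p hp => by have := h p hp; omega,
             fun p hp => by have := h p hp; omega⟩
    · exact ⟨Or.inl fun p hp => by have := h p hp; omega,
             fun p hp => by have := h p hp; omega⟩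

theorem is_report_safe_eq (r : List Int) :
    is_report_safe r = (pvOk 1 3 r || pvOk (-3) (-1) r) := by
  have hif : ∀ m w : Bool, (if (!m) = true then false else if w = true then true else false)
      = (m && w) := by decide
  simp only [is_report_safe]
  rw [dropLast_zip_drop, hif, key_all]
  simp [pvOk]

-- the filtered-enumerate comprehension is eraseIdx
theorem enum_filter_all (r : List Int) (s idx : Int) (h : idx < s) :
    ((PySem.List.enumerate r s).filter (fun p => !decide (p.1 = idx))).map Prod.snd = r := by
  induction r generalizing s with
  | nil => simp [PySem.List.enumerate]
  | cons a t ih => simp [PySem.List.enumerate, show ¬(s = idx) by omega, ih (s+1) (by omega)]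

theorem enum_filter_erase (r : List Int) (s idx : Int) (h : s ≤ idx) :
    ((PySem.List.enumerate r s).filter (fun p => !decide (p.1 = idx))).map Prod.snd
      = r.eraseIdx (idx - s).toNat := by
  induction r generalizing s with
  | nil => simp [PySem.List.enumerate]
  | cons a t ih =>
    by_cases hs : s = idx
    · subst hs
      simp [PySem.List.enumerate, enum_filter_all t (s+1) s (by omega)]
    · rw [show (idx - s).toNat = (idx - (s+1)).toNat + 1 by omega]
      simp [PySem.List.enumerate, hs, ih (s+1) (by omega)]

-- A's flag loop is an any
theorem foldl_flag (xs : List Int) (f : Int → Bool) (b : Bool) :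
    xs.foldl (fun flag idx => if f idx then true else flag) b = (b || xs.any f) := by
  induction xs generalizing b with
  | nil => simp
  | cons a t ih =>
    simp only [List.foldl_cons, List.any_cons]
    rw [ih]
    cases f a <;> simp

-- B's single scan equals A's exhaustive removal search, per direction
theorem pvOk_erase_false (lo hi : Int) (r : List Int) (i j : Nat)
    (hi1 : i + 1 < r.length) (hbad : ¬(lo ≤ r[i+1] - r[i]'(by omega) ∧ r[i+1] - r[i]'(by omega) ≤ hi))
    (hj : j < r.length) (hji : j ≠ i) (hji1 : j ≠ i + 1) :
    ¬ pvOk lo hi (r.eraseIdx j) = true := by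
  intro hok
  rw [pvOk_iff] at hok
  have hlen : (r.eraseIdx j).length = r.length - 1 := by
    rw [List.length_eraseIdx]; simp [hj]
  rcases Nat.lt_or_ge j i with hcase | hcase
  · -- j < i : the pair sits at index i-1 in the erased list
    obtain ⟨m, rfl⟩ : ∃ m, i = m + 1 := ⟨i - 1, by omega⟩
    have hk : m + 1 < (r.eraseIdx j).length := by omega
    have := hok m hk
    simp only [List.getElem_eraseIdx] at this
    rw [dif_neg (show ¬(m + 1 < j) by omega), dif_neg (show ¬(m < j) by omega)] at this
    exact hbad this
  · -- i + 1 < j : the pair sits at index i in the erased list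
    have hij : i + 1 < j := by omega
    have hk : i + 1 < (r.eraseIdx j).length := by omega
    have := hok i hk
    simp only [List.getElem_eraseIdx] at this
    rw [dif_pos (show i + 1 < j from hij), dif_pos (show i < j by omega)] at this
    exact hbad this

theorem pvDampDir_eq (lo hi : Int) (r : List Int) (hne : r ≠ []) :
    pvDampDir lo hi r = decide (∃ j < r.length, pvOk lo hi (r.eraseIdx j) = true) := by
  have hrpos : 0 < r.length := List.length_pos_iff.mpr hne
  unfold pvDampDir
  cases hfind : (pvPairs r).findIdx? (fun p => !(decide (lo ≤ p.2 - p.1) && decide (p.2 - p.1 ≤ hi))) with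
  | none =>
    rw [List.findIdx?_eq_none_iff] at hfind
    have hokr : pvOk lo hi r = true := by
      unfold pvOk
      rw [List.all_eq_true]
      intro p hp
      have := hfind p hp
      simpa using this
    rw [pvOk_iff] at hokr
    have : ∃ j < r.length, pvOk lo hi (r.eraseIdx j) = true := by
      refine ⟨r.length - 1, by omega, ?_⟩
      rw [pvOk_iff]
      intro k hk
      have hlen : (r.eraseIdx (r.length - 1)).length = r.length - 1 := by
        rw [List.length_eraseIdx]; simp [show r.length - 1 < r.length by omega]
      rw [List.getElem_eraseIdx, List.getElem_eraseIdx]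
      simp only [show k + 1 < r.length - 1 by omega, show k < r.length - 1 by omega, dif_pos]
      exact hokr k (by omega)
    simp [this]
  | some i =>
    rw [List.findIdx?_eq_some_iff_getElem] at hfind
    obtain ⟨hilen, hbadi, hfirst⟩ := hfind
    rw [pvPairs_getElem] at hbadi
    have hi1 : i + 1 < r.length := by rw [pvPairs_length] at hilen; omega
    have hbad : ¬(lo ≤ r[i+1] - r[i]'(by omega) ∧ r[i+1] - r[i]'(by omega) ≤ hi) := by
      rintro ⟨h1, h2⟩
      simp at hbadi
      omega
    show (pvOk lo hi (List.take i r ++ List.drop (i + 1) r) ||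
          pvOk lo hi (List.take (i + 1) r ++ List.drop (i + 2) r))
        = decide (∃ j < r.length, pvOk lo hi (r.eraseIdx j) = true)
    rw [← List.eraseIdx_eq_take_drop_succ, ← List.eraseIdx_eq_take_drop_succ]
    rw [Bool.eq_iff_iff, Bool.or_eq_true, decide_eq_true_iff]
    constructor
    · rintro (h | h)
      · exact ⟨i, by omega, h⟩
      · exact ⟨i + 1, by omega, h⟩
    · rintro ⟨j, hj, hok⟩
      by_cases hji : j = i
      · subst hji; exact Or.inl hok
      by_cases hji1 : j = i + 1
      · subst hji1; exact Or.inr hok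
      exact absurd hok (pvOk_erase_false lo hi r i j hi1 hbad hj hji hji1)

-- per-report equality
theorem report_eq (r : List Int) :
    decide (∃ j < r.length, is_report_safe (r.eraseIdx j) = true)
      = (!r.isEmpty && (pvDampDir 1 3 r || pvDampDir (-3) (-1) r)) := by
  cases r with
  | nil => simp
  | cons a t =>
    have hne : (a :: t) ≠ [] := by simp
    rw [pvDampDir_eq 1 3 _ hne, pvDampDir_eq (-3) (-1) _ hne]
    simp only [List.isEmpty_cons, Bool.not_false, Bool.true_and]
    rw [Bool.eq_iff_iff]
    simp only [Bool.or_eq_true, decide_eq_true_eq]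
    constructor
    · rintro ⟨j, hj, hs⟩
      rw [is_report_safe_eq] at hs
      rcases Bool.or_eq_true _ _ |>.mp hs with h | h
      · exact Or.inl ⟨j, hj, h⟩
      · exact Or.inr ⟨j, hj, h⟩
    · rintro (⟨j, hj, hs⟩ | ⟨j, hj, hs⟩) <;>
        exact ⟨j, hj, by rw [is_report_safe_eq]; simp [hs]⟩

-- ===== VERDICT (by name: the statement is the Claim_ definition above) =====
theorem get_reports_safety_w_dampener_brute_spec : Claim_equal_get_reports_safety_w_dampener_brute := by
  intro reports _
  unfold Spec_get_reports_safety_w_dampener_brute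
  unfold get_reports_safety_w_dampener_brute get_reports_safety_w_dampener_brute_alt
  rw [PySem.List.foldl_append_singleton_eq_map]
  simp only [List.nil_append]
  apply List.map_congr_left
  intro r _
  rw [← report_eq r]
  rw [foldl_flag]
  simp only [Bool.false_or]
  rw [PySem.List.pyRange_zero_natCast, List.any_map]
  rw [Bool.eq_iff_iff, List.any_eq_true, decide_eq_true_iff]
  constructor
  · rintro ⟨j, hj, hsafe⟩
    refine ⟨j, List.mem_range.mp hj, ?_⟩
    simpa [enum_filter_erase r 0 (j : Int) (Int.natCast_nonneg j), sub_zero, Int.toNat_natCast] using hsafe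
  · rintro ⟨j, hj, hsafe⟩
    refine ⟨j, List.mem_range.mpr hj, ?_⟩
    simpa [enum_filter_erase r 0 (j : Int) (Int.natCast_nonneg j), sub_zero, Int.toNat_natCast] using hsafe
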